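-- pv_equiv track=rewrite | github.com/mengjihua/Binary-Battle | 周赛/第 462 场周赛/q3.py | maxTotal
-- ===== SOURCE A (Python) =====
-- from typing import List, Tuple, Dict, Set, Optional
-- from bisect import bisect_left, bisect_right
--
-- def _max(a, b): return a if a > b else b
--
-- def maxTotal(value: List[int], limit: List[int]) -> int:
--     n = len(value)
--     val_lim_zip = sorted(zip(value, limit), key=lambda x: (x[1], -x[0]))
--     val = [vl[1] for vl in val_lim_zip]
--
--     ans = 0
--     cnt = 0
--     invalid = [False] * n
--     i = 0
--     temp = -1
--     while i < n:
--         if invalid[i]: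
--             i += 1
--             continue
--
--         if cnt < val_lim_zip[i][1]:
--             ans += val_lim_zip[i][0]
--             cnt += 1
--
--             # TODO: 重点, 二分, 这里不能从range(i + 1, n)开始, 因为还要考虑到之前的元素
--             idx = bisect_right(val, cnt) - 1
--
--             if idx >= temp:
--                 for k in range(temp + 1, idx + 1):
--                     if not invalid[k]:
--                         invalid[k] = True
--                         if k <= i:
--                             cnt -= 1
--                 temp = idx
--         i = _max(temp + 1, i + 1)
--
--     return ans
-- ===== SOURCE B (Python) =====
-- from bisect import bisect_right
--
-- def maxTotal(value, limit):
--     # Sort once by (limit asc, value desc), then run the activation process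
--     # run-by-run over maximal blocks of equal limit, replacing A's invalid[]
--     # array and per-element invalidation loop by prefix-size arithmetic.
--     pairs = [(value[i], limit[i]) for i in range(len(value))]
--     vl = sorted(pairs, key=lambda x: (x[1], -x[0]))
--     lims = []   # distinct limits, ascending (one per run)
--     vals = []   # the values of each run, in sorted order
--     for v, l in vl:
--         if lims and lims[-1] == l:
--             vals[-1].append(v)
--         else:
--             lims.append(l)
--             vals.append([v])
--     pre = [0]   # pre[j] = total number of elements in runs 0..j-1
--     for vs in vals:
--         pre.append(pre[-1] + len(vs))
--     g = len(lims)
--     ans = 0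
--     c = 0       # current active counter
--     t = -1      # runs 0..t have been spent (invalidated)
--     j = 0
--     while j < g:
--         L = lims[j]
--         vs = vals[j]
--         p = 0
--         nxt = j + 1
--         while p < len(vs):
--             if c < L:
--                 ans += vs[p]
--                 p += 1
--                 c += 1
--                 b = bisect_right(lims, c) - 1
--                 if b >= t:
--                     if b < j:
--                         c -= pre[b + 1] - pre[t + 1]
--                         t = b
--                     else:
--                         c -= pre[j] - pre[t + 1] + p
--                         t = b
--                         nxt = b + 1
--                         break
--             else:
--                 p += 1
--         j = nxt
--     return ans
-- ===== Notes on version B (the rewrite author's own statement) =====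
-- stated objective: alternative
-- what changed: Replaces A's flat while-loop with its invalid[] boolean array, per-element invalidation loop and index jumping by a two-level machine over maximal runs of equal limit: runs and their prefix sizes are precomputed once, each invalidation becomes O(1) prefix-size arithmetic, and bisect searches the list of distinct limits instead of the whole n-element limit array.
import Mathlib
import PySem

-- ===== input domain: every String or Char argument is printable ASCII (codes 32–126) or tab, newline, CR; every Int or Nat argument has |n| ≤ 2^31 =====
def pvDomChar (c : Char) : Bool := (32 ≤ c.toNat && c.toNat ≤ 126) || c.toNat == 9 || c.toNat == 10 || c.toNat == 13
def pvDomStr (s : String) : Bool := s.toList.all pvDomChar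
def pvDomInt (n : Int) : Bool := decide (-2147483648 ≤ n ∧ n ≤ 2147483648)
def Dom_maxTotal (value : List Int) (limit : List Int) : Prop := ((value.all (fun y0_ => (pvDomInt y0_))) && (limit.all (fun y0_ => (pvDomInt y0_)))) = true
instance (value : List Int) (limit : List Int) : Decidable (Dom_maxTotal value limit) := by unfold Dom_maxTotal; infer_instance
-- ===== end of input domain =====

-- B is an alternative implementation of the same activation process: it works run-by-run over
-- maximal blocks of equal limit with precomputed prefix sizes, instead of A's flat loop with an
-- invalid[] array, per-element invalidation loop and index jumps.  Same asymptotic cost.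

-- ===== PORT A =====

-- `_max` helper of A
def pvMax (a b : Int) : Int := if a > b then a else b

-- the `while i < n` loop of A; state (ans, cnt, invalid, i, temp).  i strictly increases every
-- iteration, so fuel = n iterations suffice; the fuel argument only makes the recursion structural.
def maxTotalLoop (vl : List (Int × Int)) (val : List Int) (n : Int) :
    Nat → Int → Int → List Bool → Int → Int → Int
  | 0, ans, _cnt, _invalid, _i, _temp => ans
  | fuel + 1, ans, cnt, invalid, i, temp =>
    if i < n then
      if PySem.List.pyGetD invalid i false then
        maxTotalLoop vl val n fuel ans cnt invalid (i + 1) temp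
      else if cnt < (PySem.List.pyGetD vl i (0, 0)).2 then
        let ans' := ans + (PySem.List.pyGetD vl i (0, 0)).1
        let cnt' := cnt + 1
        let idx : Int := (PySem.List.bisectRight val cnt' : Int) - 1
        if idx ≥ temp then
          -- `for k in range(temp + 1, idx + 1): …` updating (invalid, cnt)
          let st := (PySem.List.pyRange (temp + 1) (idx + 1) 1).foldl
            (fun (s : List Bool × Int) k =>
              if PySem.List.pyGetD s.1 k false then s
              else (PySem.List.pySetD s.1 k true, if k ≤ i then s.2 - 1 else s.2))
            (invalid, cnt')
          maxTotalLoop vl val n fuel ans' st.2 st.1 (pvMax (idx + 1) (i + 1)) idx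
        else
          maxTotalLoop vl val n fuel ans' cnt' invalid (pvMax (temp + 1) (i + 1)) temp
      else
        maxTotalLoop vl val n fuel ans cnt invalid (pvMax (temp + 1) (i + 1)) temp
    else ans

def maxTotal (value : List Int) (limit : List Int) : Int :=
  let n : Int := value.length
  let vl := PySem.List.sorted2 (value.zip limit) (fun x => x.2) (fun x => -x.1)
  let val := vl.map (fun x => x.2)
  maxTotalLoop vl val n n.toNat 0 0 (List.replicate n.toNat false) 0 (-1)

-- ===== PORT B =====

-- one step of B's run-building loop: `if lims and lims[-1] == l: vals[-1].append(v) else: …`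
def altRunsStep (acc : List Int × List (List Int)) (x : Int × Int) : List Int × List (List Int) :=
  match acc.1.getLast? with
  | some L =>
      if L == x.2 then (acc.1, acc.2.dropLast ++ [(acc.2.getLast?.getD []) ++ [x.1]])
      else (acc.1 ++ [x.2], acc.2 ++ [[x.1]])
  | none => (acc.1 ++ [x.2], acc.2 ++ [[x.1]])

-- `pre = [0]; for vs in vals: pre.append(pre[-1] + len(vs))`
def altPre (vals : List (List Int)) : List Int :=
  vals.foldl (fun acc vs => acc ++ [acc.getLast?.getD 0 + (vs.length : Int)]) [0]

-- B's inner `while p < len(vs)` loop; returns the next outer state (ans, c, t, nxt).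
-- p strictly increases and the loop stops at p = len(vs), so fuel = len(vs) suffices; the fuel
-- argument only makes the recursion structural.
def altInner (lims pre : List Int) (j : Int) (L : Int) (vs : List Int) :
    Nat → Int → Int → Int → Int → Int → Int × Int × Int × Int
  | 0, ans, c, t, _p, nxt => (ans, c, t, nxt)
  | fuel + 1, ans, c, t, p, nxt =>
    if p < (vs.length : Int) then
      if c < L then
        let ans' := ans + PySem.List.pyGetD vs p 0
        let p' := p + 1
        let c' := c + 1
        let b : Int := (PySem.List.bisectRight lims c' : Int) - 1
        if b ≥ t then
          if b < j then
            altInner lims pre j L vs fuel ans'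
              (c' - (PySem.List.pyGetD pre (b + 1) 0 - PySem.List.pyGetD pre (t + 1) 0)) b p' nxt
          else
            (ans', c' - (PySem.List.pyGetD pre j 0 - PySem.List.pyGetD pre (t + 1) 0 + p'), b, b + 1)
        else
          altInner lims pre j L vs fuel ans' c' t p' nxt
      else
        altInner lims pre j L vs fuel ans c t (p + 1) nxt
    else (ans, c, t, nxt)

-- B's outer `while j < g` loop (j strictly increases each iteration, so `g` iterations suffice;
-- the fuel argument only makes the recursion structural)
def altOuter (lims : List Int) (vals : List (List Int)) (pre : List Int) (g : Int)
    (fuel : Nat) (ans c t j : Int) : Int :=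
  match fuel with
  | 0 => ans
  | fuel + 1 =>
    if j < g then
      let L := PySem.List.pyGetD lims j 0
      let vs := PySem.List.pyGetD vals j []
      let r := altInner lims pre j L vs vs.length ans c t 0 (j + 1)
      altOuter lims vals pre g fuel r.1 r.2.1 r.2.2.1 r.2.2.2
    else ans

-- On Pre_ (len(value) ≤ len(limit)) Source B's index comprehension `[(value[i], limit[i]) …]`
-- equals `value.zip limit`, which is how it is ported here.
def maxTotal_alt (value : List Int) (limit : List Int) : Int :=
  let vl := PySem.List.sorted2 (value.zip limit) (fun x => x.2) (fun x => -x.1)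
  let lv := vl.foldl altRunsStep ([], [])
  let pre := altPre lv.2
  let g : Int := lv.1.length
  altOuter lv.1 lv.2 pre g lv.1.length 0 0 (-1) 0

-- ===== PRECONDITION & SPEC =====
-- Pre_ excludes exactly the inputs where both programs raise IndexError: with
-- len(value) > len(limit), A indexes its zip-truncated pair list out of range and B's
-- comprehension reads limit[i] out of range; neither returns a value there.
def Pre_maxTotal (value : List Int) (limit : List Int) : Prop := value.length ≤ limit.length
instance (value : List Int) (limit : List Int) : Decidable (Pre_maxTotal value limit) := by
  unfold Pre_maxTotal; infer_instance

def pvWitness_maxTotal : List Int × List Int := ([3, 1, 4], [2, 1, 2])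

def Spec_maxTotal (value : List Int) (limit : List Int) (out : Int) : Prop := out = maxTotal_alt value limit
instance (value : List Int) (limit : List Int) (out : Int) : Decidable (Spec_maxTotal value limit out) := by unfold Spec_maxTotal; infer_instance

-- ===== CLAIM (what is proved, stated in full; the proofs are below) =====
def Claim_equal_maxTotal : Prop := ∀ (value : List Int) (limit : List Int), Dom_maxTotal value limit → Pre_maxTotal value limit → Spec_maxTotal value limit (maxTotal value limit)

-- ===== LEMMAS AND PROOFS =====

def pvPT (n : Nat) (a : Int) : List Bool := (List.range n).map (fun (k : Nat) => decide ((k : Int) < a))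

theorem pvPT_getD (n : Nat) (a : Int) {i : Int} (hi : 0 ≤ i) :
    PySem.List.pyGetD (pvPT n a) i false = decide (i < a ∧ i < (n : Int)) := by
  rw [PySem.List.pyGetD_of_nonneg _ _ hi]
  by_cases h : i.toNat < n
  · rw [pvPT, PySem.List.getD_map_range _ _ _ _ h]
    simp only [decide_eq_decide]
    omega
  · rw [List.getD_eq_default]
    · symm; simp only [decide_eq_false_iff_not]; omega
    · simp only [pvPT, List.length_map, List.length_range]; omega

theorem pvPT_set (n : Nat) {a : Int} (ha : 0 ≤ a) :
    PySem.List.pySetD (pvPT n a) a true = pvPT n (a + 1) := by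
  rw [PySem.List.pySetD_of_nonneg _ _ ha]
  apply List.ext_getElem (by simp [pvPT])
  intro k h1 h2
  simp only [pvPT, List.length_map, List.length_range] at h2
  rw [List.getElem_set]
  simp only [pvPT, List.getElem_map, List.getElem_range]
  split
  · symm; rw [decide_eq_true_iff]; omega
  · simp only [decide_eq_decide]; omega

theorem pvInvFold (nn : Nat) (i : Int) :
    ∀ (d : Nat) (a c : Int), 0 ≤ a →
    (PySem.List.pyRange a (a + d) 1).foldl
      (fun (s : List Bool × Int) k =>
        if PySem.List.pyGetD s.1 k false then s
        else (PySem.List.pySetD s.1 k true, if k ≤ i then s.2 - 1 else s.2))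
      (pvPT nn a, c)
    = (pvPT nn (a + d), c - max 0 (min (a + d) (i + 1) - a)) := by
  intro d
  induction d with
  | zero =>
    intro a c ha
    rw [PySem.List.pyRange_one_eq_nil (by omega)]
    simp only [List.foldl_nil, Nat.cast_zero, add_zero]
    congr 1
    omega
  | succ d ih =>
    intro a c ha
    rw [PySem.List.pyRange_one_cons (by omega : a < a + ((d + 1 : Nat) : Int))]
    simp only [List.foldl_cons]
    rw [pvPT_getD nn a ha, if_neg (by simp only [decide_eq_true_iff]; omega)]
    rw [pvPT_set nn ha]
    have harr : a + ((d + 1 : Nat) : Int) = (a + 1) + (d : Nat) := by push_cast; ring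
    rw [harr]
    rw [ih (a + 1) _ (by omega)]
    congr 1
    split <;> omega

theorem pvInsertBy_pairwise {α : Type} (before : α → α → Bool) (R : α → α → Prop)
    (htr : ∀ a b c, R a b → R b c → R a c)
    (h1 : ∀ a b, before a b = true → R a b) (h2 : ∀ a b, before a b = false → R b a)
    (x : α) : ∀ (acc : List α), acc.Pairwise R → (PySem.List.insertBy before x acc).Pairwise R := by
  intro acc
  induction acc with
  | nil => intro _; simp [PySem.List.insertBy]
  | cons y ys ih =>
    intro hp
    rw [List.pairwise_cons] at hp
    obtain ⟨hy, hys⟩ := hp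
    simp only [PySem.List.insertBy]
    by_cases hb : before x y = true
    · rw [if_pos hb]
      refine List.Pairwise.cons ?_ (List.Pairwise.cons hy hys)
      intro z hz
      rcases List.mem_cons.mp hz with rfl | hz'
      · exact h1 _ _ hb
      · exact htr _ _ _ (h1 _ _ hb) (hy _ hz')
    · rw [if_neg hb]
      refine List.Pairwise.cons ?_ (ih hys)
      intro z hz
      rcases (PySem.List.mem_insertBy before x z ys).mp hz with rfl | hz'
      · exact h2 _ _ (by simpa using hb)
      · exact hy _ hz'

theorem pvFoldlInsert_pairwise {α : Type} (before : α → α → Bool) (R : α → α → Prop)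
    (htr : ∀ a b c, R a b → R b c → R a c)
    (h1 : ∀ a b, before a b = true → R a b) (h2 : ∀ a b, before a b = false → R b a) :
    ∀ (xs acc : List α), acc.Pairwise R →
      (xs.foldl (fun acc x => PySem.List.insertBy before x acc) acc).Pairwise R := by
  intro xs
  induction xs with
  | nil => intro acc h; simpa using h
  | cons x xs ih =>
    intro acc h
    simp only [List.foldl_cons]
    exact ih _ (pvInsertBy_pairwise before R htr h1 h2 x acc h)

-- the (limit, -value) sort is weakly increasing in the limit component
theorem pvSorted2_key1 {α : Type} (xs : List α) (k1 k2 : α → Int) :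
    (PySem.List.sorted2 xs k1 k2 false).Pairwise (fun a b => k1 a ≤ k1 b) := by
  simp only [PySem.List.sorted2, if_neg (by decide : ¬ (false = true))]
  apply pvFoldlInsert_pairwise
  · intro a b c hab hbc; omega
  · intro a b h
    simp only [Bool.or_eq_true, Bool.and_eq_true, Bool.not_eq_true', decide_eq_true_eq,
      decide_eq_false_iff_not] at h
    rcases h with h | ⟨h, _⟩ <;> omega
  · intro a b h
    by_contra hc
    push_neg at hc
    simp [hc] at h
  · exact List.Pairwise.nil

-- the flat pair list a run structure denotes
def pvFlat (lims : List Int) (vals : List (List Int)) : List (Int × Int) :=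
  (lims.zip vals).flatMap (fun r => r.2.map (fun v => (v, r.1)))

def pvRunsOK (vl : List (Int × Int)) (lims : List Int) (vals : List (List Int)) : Prop :=
  lims.length = vals.length ∧ (∀ vs ∈ vals, vs ≠ []) ∧ lims.Pairwise (· < ·) ∧
  pvFlat lims vals = vl

theorem pvFlat_append (l0 : List Int) (v0 : List (List Int)) (L : Int) (vs : List Int)
    (hlen : l0.length = v0.length) :
    pvFlat (l0 ++ [L]) (v0 ++ [vs]) = pvFlat l0 v0 ++ vs.map (fun v => (v, L)) := by
  simp [pvFlat, List.zip_append hlen]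

-- every run key occurs as the key of some flat element
theorem pvFlat_key_mem : ∀ (lims : List Int) (vals : List (List Int)),
    lims.length = vals.length → (∀ vs ∈ vals, vs ≠ []) →
    ∀ L ∈ lims, ∃ y ∈ pvFlat lims vals, y.2 = L := by
  intro lims
  induction lims with
  | nil => simp
  | cons l ls ih =>
    intro vals hlen hne L hL
    match vals with
    | [] => simp at hlen
    | vs :: vals' =>
      simp only [List.length_cons, Nat.succ.injEq] at hlen
      rcases List.mem_cons.mp hL with rfl | hL'
      · have hvs : vs ≠ [] := hne vs (by simp)
        match vs with
        | [] => exact absurd rfl hvs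
        | v :: _ => exact ⟨(v, L), by simp [pvFlat], rfl⟩
      · obtain ⟨y, hy1, hy2⟩ := ih vals' hlen (fun vs h => hne vs (by simp [h])) L hL'
        exact ⟨y, by simp only [pvFlat] at hy1 ⊢; simp [hy1], hy2⟩

theorem pvRuns_invariant :
    ∀ (rest pref : List (Int × Int)) (lims : List Int) (vals : List (List Int)),
    (pref ++ rest).Pairwise (fun a b => a.2 ≤ b.2) →
    pvRunsOK pref lims vals →
    pvRunsOK (pref ++ rest) (rest.foldl altRunsStep (lims, vals)).1
      (rest.foldl altRunsStep (lims, vals)).2 := by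
  intro rest
  induction rest with
  | nil => intro pref lims vals _ h; simpa using h
  | cons x rest ih =>
    intro pref lims vals hsort hok
    obtain ⟨hlen, hne, hpw, hflat⟩ := hok
    have hstep : pvRunsOK (pref ++ [x]) (altRunsStep (lims, vals) x).1 (altRunsStep (lims, vals) x).2 := by
      have hkey : ∀ y ∈ pref, y.2 ≤ x.2 := by
        intro y hy
        have := (List.pairwise_append.mp hsort).2.2 y hy x (by simp)
        exact this
      match hL : lims.getLast? with
      | none =>
        -- lims = [] hence vals = [] hence pref = []
        have hlnil : lims = [] := List.getLast?_eq_none_iff.mp hL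
        subst hlnil
        have hvnil : vals = [] := List.length_eq_zero_iff.mp hlen.symm
        subst hvnil
        have hpnil : pref = [] := by simpa [pvFlat] using hflat
        subst hpnil
        simp only [altRunsStep, hL]
        refine ⟨by simp, by simp, by simp, by simp [pvFlat, Prod.ext_iff]⟩
      | some L =>
        obtain ⟨l0, rfl⟩ := List.getLast?_eq_some_iff.mp hL
        have hvne : vals ≠ [] := by
          intro h; subst h; simp at hlen
        obtain ⟨v0, vs, rfl⟩ : ∃ v0 vs, vals = v0 ++ [vs] := by
          rcases List.eq_nil_or_concat vals with h | ⟨v0, vs, h⟩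
          · exact absurd h hvne
          · exact ⟨v0, vs, by simpa using h⟩
        have hlen0 : l0.length = v0.length := by
          rw [List.length_append, List.length_append] at hlen
          simpa using hlen
        simp only [altRunsStep, hL]
        by_cases heq : L == x.2
        · rw [if_pos heq]
          have hx2 : x.2 = L := by
            have h' : L = x.2 := by simpa using heq
            omega
          refine ⟨by simpa using hlen, ?_, hpw, ?_⟩
          · intro ws hws
            simp only [List.dropLast_concat, List.getLast?_concat] at hws
            rcases List.mem_append.mp hws with h | h
            · exact hne ws (List.mem_append.mpr (Or.inl h))
            · simp only [List.mem_singleton] at h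
              subst h; simp
          · simp only [List.dropLast_concat, List.getLast?_concat, Option.getD_some]
            rw [pvFlat_append l0 v0 L (vs ++ [x.1]) hlen0]
            rw [pvFlat_append l0 v0 L vs hlen0] at hflat
            rw [← hflat]
            simp [← hx2]
        · rw [if_neg heq]
          have hx2 : L ≠ x.2 := by simpa using heq
          have hLle : L ≤ x.2 := by
            obtain ⟨y, hy1, hy2⟩ := pvFlat_key_mem (l0 ++ [L]) (v0 ++ [vs])
              hlen hne L (by simp)
            rw [hflat] at hy1
            rw [← hy2]; exact hkey y hy1
          refine ⟨by simp only [List.length_append, List.length_cons, List.length_nil] at hlen ⊢; omega, ?_, ?_, ?_⟩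
          · intro ws hws
            rcases List.mem_append.mp hws with h | h
            · exact hne ws h
            · simp only [List.mem_singleton] at h; subst h; simp
          · rw [List.pairwise_append]
            refine ⟨hpw, by simp, ?_⟩
            intro a ha b hb
            simp only [List.mem_singleton] at hb; subst hb
            have haL : a ≤ L := by
              rcases List.mem_append.mp ha with h | h
              · have := (List.pairwise_append.mp hpw).2.2 a h L (by simp)
                omega
              · simp only [List.mem_singleton] at h; omega
            omega
          · rw [pvFlat_append (l0 ++ [L]) (v0 ++ [vs]) x.2 [x.1] hlen]
            rw [hflat]
            simp
    have hsort' : ((pref ++ [x]) ++ rest).Pairwise (fun a b => a.2 ≤ b.2) := by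
      simpa [List.append_assoc] using hsort
    have := ih (pref ++ [x]) _ _ hsort' hstep
    simpa [List.append_assoc] using this

-- number of elements in the first k runs
def pvSP (vals : List (List Int)) (k : Nat) : Nat := ((vals.take k).map List.length).sum

theorem pvSP_zero (vals : List (List Int)) : pvSP vals 0 = 0 := rfl

theorem pvSP_cons (vs : List Int) (vals : List (List Int)) (k : Nat) :
    pvSP (vs :: vals) (k + 1) = vs.length + pvSP vals k := by
  simp [pvSP]

theorem pvSP_succ (vals : List (List Int)) (k : Nat) (hk : k < vals.length) :
    pvSP vals (k + 1) = pvSP vals k + (vals.getD k []).length := by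
  induction vals generalizing k with
  | nil => simp at hk
  | cons vs vals ih =>
    match k with
    | 0 => simp [pvSP]
    | k + 1 =>
      rw [pvSP_cons, pvSP_cons, ih k (by simpa using hk)]
      simp [Nat.add_assoc]

theorem pvSP_mono (vals : List (List Int)) : ∀ {k k' : Nat}, k ≤ k' →
    pvSP vals k ≤ pvSP vals k' := by
  induction vals with
  | nil => intro k k' _; simp [pvSP]
  | cons vs vals ih =>
    intro k k' h
    match k, k' with
    | 0, k' => simp [pvSP_zero]
    | k + 1, k' + 1 =>
      rw [pvSP_cons, pvSP_cons]
      have := ih (k := k) (k' := k') (by omega)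
      omega

theorem pvSP_strict (vals : List (List Int)) (hne : ∀ vs ∈ vals, vs ≠ []) {k : Nat}
    (hk : k < vals.length) : pvSP vals k < pvSP vals (k + 1) := by
  rw [pvSP_succ vals k hk]
  have hg : vals.getD k [] = vals[k] := by
    rw [List.getD_eq_getElem?_getD, List.getElem?_eq_getElem hk, Option.getD_some]
  have h1 : vals.getD k [] ≠ [] := by
    rw [hg]; exact hne _ (List.getElem_mem hk)
  have h2 : 0 < (vals.getD k []).length := List.length_pos_iff.mpr h1
  omega

theorem altPre_aux :
    ∀ (vals : List (List Int)) (acc : List Int) (s : Int), acc.getLast? = some s →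
    vals.foldl (fun acc vs => acc ++ [acc.getLast?.getD 0 + (vs.length : Int)]) acc
      = acc ++ (List.range vals.length).map (fun (k : Nat) => s + (pvSP vals (k + 1) : Int)) := by
  intro vals
  induction vals with
  | nil => intro acc s _; simp
  | cons vs vals ih =>
    intro acc s hs
    simp only [List.foldl_cons, hs, Option.getD_some]
    rw [ih (acc ++ [s + (vs.length : Int)]) (s + (vs.length : Int)) List.getLast?_concat]
    rw [List.append_assoc]
    congr 1
    rw [List.length_cons, List.range_succ_eq_map]
    simp only [List.map_cons, List.map_map, List.singleton_append]
    congr 1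
    · apply List.map_congr_left
      intro k _
      simp only [Function.comp_apply, Nat.succ_eq_add_one]
      rw [pvSP_cons vs vals (k + 1)]
      push_cast; ring

theorem altPre_eq (vals : List (List Int)) :
    altPre vals = (List.range (vals.length + 1)).map (fun (k : Nat) => (pvSP vals k : Int)) := by
  rw [altPre, altPre_aux vals [0] 0 rfl]
  rw [List.range_succ_eq_map]
  simp only [List.map_cons, List.map_map, pvSP_zero, Nat.cast_zero]
  rw [List.singleton_append]
  congr 1
  apply List.map_congr_left
  intro k _
  simp [Nat.succ_eq_add_one]

theorem altPre_getD (vals : List (List Int)) {k : Int} (h0 : 0 ≤ k) (h1 : k ≤ (vals.length : Int)) :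
    PySem.List.pyGetD (altPre vals) k 0 = (pvSP vals k.toNat : Int) := by
  rw [PySem.List.pyGetD_of_nonneg _ _ h0, altPre_eq]
  rw [PySem.List.getD_map_range _ _ _ _ (by omega)]

theorem pvFlat_cons (l : Int) (ls : List Int) (vs : List Int) (vals : List (List Int)) :
    pvFlat (l :: ls) (vs :: vals) = vs.map (fun v => (v, l)) ++ pvFlat ls vals := by
  simp [pvFlat]

theorem pvFlat_length : ∀ (lims : List Int) (vals : List (List Int)),
    lims.length = vals.length → (pvFlat lims vals).length = pvSP vals lims.length := by
  intro lims
  induction lims with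
  | nil => intro vals _; simp [pvFlat, pvSP]
  | cons l ls ih =>
    intro vals hlen
    match vals with
    | [] => simp at hlen
    | vs :: vals =>
      rw [pvFlat_cons, List.length_append, List.length_map, List.length_cons, pvSP_cons,
        ih vals (by simpa using hlen)]

theorem pvFlat_getD : ∀ (lims : List Int) (vals : List (List Int)),
    lims.length = vals.length →
    ∀ (j p : Nat), j < lims.length → p < (vals.getD j []).length →
    (pvFlat lims vals).getD (pvSP vals j + p) (0, 0)
      = ((vals.getD j []).getD p 0, lims.getD j 0) := by
  intro lims
  induction lims with
  | nil => intro vals _ j p hj _; simp at hj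
  | cons l ls ih =>
    intro vals hlen j p hj hp
    match vals with
    | [] => simp at hlen
    | vs :: vals =>
      rw [pvFlat_cons]
      match j with
      | 0 =>
        simp only [List.getD_cons_zero] at hp ⊢
        rw [pvSP_zero, Nat.zero_add, List.getD_append _ _ _ _ (by simpa using hp)]
        rw [List.getD_eq_getElem?_getD, List.getElem?_map, List.getElem?_eq_getElem hp]
        simp [List.getD_eq_getElem?_getD, List.getElem?_eq_getElem hp]
      | j + 1 =>
        simp only [List.getD_cons_succ] at hp ⊢
        rw [pvSP_cons]
        rw [List.getD_append_right _ _ _ _ (by simp; omega)]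
        have harr : vs.length + pvSP vals j + p - (vs.map (fun v => (v, l))).length
            = pvSP vals j + p := by simp; omega
        rw [harr, ih vals (by simpa using hlen) j p (by simpa using hj) hp]

theorem pvFlat_block : ∀ (lims : List Int) (vals : List (List Int)),
    lims.length = vals.length →
    ∀ (q : Nat), q < pvSP vals lims.length →
    ∃ j : Nat, j < lims.length ∧ pvSP vals j ≤ q ∧ q < pvSP vals (j + 1) ∧
      ((pvFlat lims vals).getD q (0, 0)).2 = lims.getD j 0 := by
  intro lims
  induction lims with
  | nil => intro vals _ q hq; simp [pvSP] at hq
  | cons l ls ih =>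
    intro vals hlen q hq
    match vals with
    | [] => simp at hlen
    | vs :: vals =>
      by_cases hcase : q < vs.length
      · refine ⟨0, by simp, by simp [pvSP_zero], ?_, ?_⟩
        · rw [pvSP_cons, pvSP_zero]; omega
        · rw [pvFlat_cons, List.getD_append _ _ _ _ (by simpa using hcase)]
          rw [List.getD_eq_getElem?_getD, List.getElem?_map, List.getElem?_eq_getElem hcase]
          simp
      · have hlen' : ls.length = vals.length := by simpa using hlen
        have hq' : q - vs.length < pvSP vals ls.length := by
          rw [List.length_cons, pvSP_cons] at hq; omega
        obtain ⟨j, hj1, hj2, hj3, hj4⟩ := ih vals hlen' (q - vs.length) hq'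
        refine ⟨j + 1, by simpa using hj1, ?_, ?_, ?_⟩
        · rw [pvSP_cons]; omega
        · rw [pvSP_cons]; omega
        · rw [pvFlat_cons, List.getD_append_right _ _ _ _ (by simp; omega)]
          simpa using hj4

theorem pvFlat_key_in : ∀ (lims : List Int) (vals : List (List Int)),
    ∀ y ∈ pvFlat lims vals, y.2 ∈ lims := by
  intro lims vals y hy
  simp only [pvFlat, List.mem_flatMap] at hy
  obtain ⟨r, hr, hy2⟩ := hy
  simp only [List.mem_map] at hy2
  obtain ⟨v, _, rfl⟩ := hy2
  exact (List.of_mem_zip hr).1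

theorem pvFlat_snd_pairwise : ∀ (lims : List Int) (vals : List (List Int)),
    lims.length = vals.length → lims.Pairwise (· < ·) →
    ((pvFlat lims vals).map (fun x => x.2)).Pairwise (· ≤ ·) := by
  intro lims
  induction lims with
  | nil => intro vals _ _; simp [pvFlat]
  | cons l ls ih =>
    intro vals hlen hpw
    match vals with
    | [] => simp at hlen
    | vs :: vals =>
      rw [pvFlat_cons, List.map_append, List.pairwise_append]
      rw [List.pairwise_cons] at hpw
      refine ⟨?_, ih vals (by simpa using hlen) hpw.2, ?_⟩
      · -- constant block
        rw [List.map_map, List.pairwise_map]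
        exact List.pairwise_of_forall (fun _ _ => le_refl l)
      · intro a ha b hb
        simp only [List.map_map, List.mem_map, Function.comp_apply] at ha hb
        obtain ⟨v, _, rfl⟩ := ha
        obtain ⟨y, hy, rfl⟩ := hb
        have hmem : y.2 ∈ ls := pvFlat_key_in ls vals y hy
        have := hpw.1 _ hmem
        omega

theorem pvBisect_unique (xs : List Int) (x : Int) (hs : xs.Pairwise (· ≤ ·)) (r : Nat)
    (hr : r ≤ xs.length) (h1 : ∀ q (_ : q < xs.length), q < r → xs[q] ≤ x)
    (h2 : ∀ q (_ : q < xs.length), r ≤ q → x < xs[q]) :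
    PySem.List.bisectRight xs x = r := by
  obtain ⟨hb0, hb1, hb2⟩ := PySem.List.bisectRight_spec xs x hs
  by_contra hne
  rcases Nat.lt_or_ge (PySem.List.bisectRight xs x) r with h | h
  · have hq : PySem.List.bisectRight xs x < xs.length := lt_of_lt_of_le h hr
    exact absurd (h1 _ hq h) (not_le.mpr (hb2 _ hq (le_refl _)))
  · have h' : r < PySem.List.bisectRight xs x := lt_of_le_of_ne h (Ne.symm hne)
    have hq : r < xs.length := lt_of_lt_of_le h' hb0
    exact absurd (hb1 r hq h') (not_le.mpr (h2 r hq (le_refl r)))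

theorem pvGetD_getElem {α : Type} (xs : List α) (q : Nat) (d : α) (h : q < xs.length) :
    xs.getD q d = xs[q] := by
  rw [List.getD_eq_getElem?_getD, List.getElem?_eq_getElem h, Option.getD_some]

theorem pvBisect_flat (lims : List Int) (vals : List (List Int))
    (hlen : lims.length = vals.length) (hne : ∀ vs ∈ vals, vs ≠ [])
    (hpw : lims.Pairwise (· < ·)) (c : Int) :
    PySem.List.bisectRight ((pvFlat lims vals).map (fun x => x.2)) c
      = pvSP vals (PySem.List.bisectRight lims c) := by
  have hpwle : lims.Pairwise (· ≤ ·) := hpw.imp (fun h => le_of_lt h)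
  obtain ⟨hb0, hb1, hb2⟩ := PySem.List.bisectRight_spec lims c hpwle
  have hlenv : ((pvFlat lims vals).map (fun x => x.2)).length = pvSP vals lims.length := by
    rw [List.length_map, pvFlat_length lims vals hlen]
  have hval : ∀ q : Nat, ∀ h : q < ((pvFlat lims vals).map (fun x => x.2)).length,
      ∃ j : Nat, j < lims.length ∧ pvSP vals j ≤ q ∧ q < pvSP vals (j + 1) ∧
        ((pvFlat lims vals).map (fun x => x.2))[q] = lims.getD j 0 := by
    intro q h
    obtain ⟨j, hj1, hj2, hj3, hj4⟩ := pvFlat_block lims vals hlen q (by omega)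
    refine ⟨j, hj1, hj2, hj3, ?_⟩
    rw [← pvGetD_getElem _ q 0 (by omega)]
    have := PySem.List.pyGetD_map (fun x => x.2) (pvFlat lims vals) (q : Int) ((0 : Int), (0 : Int))
    rw [PySem.List.pyGetD_natCast, PySem.List.pyGetD_natCast] at this
    rw [show ((0, 0) : Int × Int).2 = (0 : Int) from rfl] at this
    rw [this, hj4]
  apply pvBisect_unique
  · exact pvFlat_snd_pairwise lims vals hlen hpw
  · rw [hlenv]; exact pvSP_mono vals hb0
  · intro q hq hlt
    obtain ⟨j, hj1, hj2, hj3, hj4⟩ := hval q hq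
    have hjb : j < PySem.List.bisectRight lims c := by
      by_contra hge
      have := pvSP_mono vals (k := PySem.List.bisectRight lims c) (k' := j) (by omega)
      omega
    rw [hj4, pvGetD_getElem _ j 0 hj1]
    exact hb1 j hj1 hjb
  · intro q hq hge
    obtain ⟨j, hj1, hj2, hj3, hj4⟩ := hval q hq
    have hjb : PySem.List.bisectRight lims c ≤ j := by
      by_contra hlt
      have := pvSP_mono vals (k := j + 1) (k' := PySem.List.bisectRight lims c) (by omega)
      omega
    rw [hj4, pvGetD_getElem _ j 0 hj1]
    exact hb2 j hj1 hjb


theorem pvMax_eq_max (a b : Int) : pvMax a b = max a b := by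
  unfold pvMax; split <;> omega

theorem pvSP_strict_mono (vals : List (List Int)) (hne : ∀ vs ∈ vals, vs ≠ [])
    {x y : Nat} (hxy : x < y) (hy : y ≤ vals.length) : pvSP vals x < pvSP vals y := by
  have h1 := pvSP_strict vals hne (k := x) (by omega)
  have h2 := pvSP_mono vals (k := x + 1) (k' := y) (by omega)
  omega

theorem altOuter_ge (lims : List Int) (vals : List (List Int)) (pre : List Int) (g : Int)
    (fuel : Nat) (ans c t j : Int) (h : ¬ j < g) :
    altOuter lims vals pre g fuel ans c t j = ans := by
  cases fuel with
  | zero => rfl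
  | succ fuel => simp only [altOuter, if_neg h]


theorem maxTotalLoop_stop (vl : List (Int × Int)) (val : List Int) (n : Int) (fuel : Nat)
    (ans cnt : Int) (invalid : List Bool) (i temp : Int) (h : ¬ i < n) :
    maxTotalLoop vl val n fuel ans cnt invalid i temp = ans := by
  cases fuel <;> simp [maxTotalLoop, h]

theorem pvBisim (lims : List Int) (vals : List (List Int))
    (hlen : lims.length = vals.length) (hne : ∀ vs ∈ vals, vs ≠ [])
    (hpw : lims.Pairwise (· < ·)) :
    ∀ (N : Nat) (fuel fa : Nat) (j p : Nat) (t ans c : Int),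
    (lims.length - j) * (pvSP vals lims.length + 1) + ((vals.getD j []).length - p) ≤ N →
    j ≤ lims.length →
    (j < lims.length → p ≤ (vals.getD j []).length) →
    (j = lims.length → p = 0) →
    -1 ≤ t → t < (j : Int) →
    (j < lims.length → (lims.length : Int) - j - 1 ≤ (fuel : Int)) →
    pvSP vals lims.length ≤ fa + (pvSP vals j + p) →
    maxTotalLoop (pvFlat lims vals) ((pvFlat lims vals).map (fun x => x.2))
      ((pvFlat lims vals).length : Int) fa
      ans c (pvPT (pvFlat lims vals).length (pvSP vals (t + 1).toNat : Int))
      ((pvSP vals j : Int) + (p : Int)) ((pvSP vals (t + 1).toNat : Int) - 1)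
    = (if j < lims.length then
        (fun r : Int × Int × Int × Int =>
          altOuter lims vals (altPre vals) (lims.length : Int) fuel r.1 r.2.1 r.2.2.1 r.2.2.2)
          (altInner lims (altPre vals) (j : Int) (lims.getD j 0) (vals.getD j [])
            ((vals.getD j []).length - p) ans c t (p : Int) ((j : Int) + 1))
      else ans) := by
  intro N
  induction N with
  | zero =>
    intro fuel fa j p t ans c hN hj hp hp0 ht1 ht2 hfuel hfa
    have hjg : j = lims.length := by
      by_contra h
      have h1 : 1 ≤ lims.length - j := by omega
      have h2 : 1 * (pvSP vals lims.length + 1)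
          ≤ (lims.length - j) * (pvSP vals lims.length + 1) :=
        Nat.mul_le_mul_right _ h1
      omega
    subst hjg
    rw [if_neg (by omega)]
    have hp' : p = 0 := hp0 rfl
    subst hp'
    have hn : (pvFlat lims vals).length = pvSP vals lims.length :=
      pvFlat_length lims vals hlen
    exact maxTotalLoop_stop _ _ _ _ _ _ _ _ _ (by rw [hn]; push_cast; omega)
  | succ N ih =>
    intro fuel fa j p t ans c hN hj hp hp0 ht1 ht2 hfuel hfa
    have hn : (pvFlat lims vals).length = pvSP vals lims.length :=
      pvFlat_length lims vals hlen
    by_cases hjg : j < lims.length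
    · rw [if_pos hjg]
      have hplen := hp hjg
      have htj : (t + 1).toNat ≤ j := by omega
      have hSPt_le : pvSP vals (t + 1).toNat ≤ pvSP vals j := pvSP_mono vals htj
      have hSPjn : pvSP vals (j + 1) ≤ pvSP vals lims.length := pvSP_mono vals (by omega)
      have hSPsucc : pvSP vals (j + 1) = pvSP vals j + (vals.getD j []).length :=
        pvSP_succ vals j (by omega)
      by_cases hpm : p < (vals.getD j []).length
      · -- a real step inside run j, at flat position i = SP j + p
        have hin : ((pvSP vals j : Int) + p) < ((pvFlat lims vals).length : Int) := by
          rw [hn]; push_cast; omega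
        obtain ⟨fa', rfl⟩ : ∃ f, fa = f + 1 := ⟨fa - 1, by omega⟩
        simp only [maxTotalLoop]
        rw [if_pos hin]
        rw [pvPT_getD _ _ (by positivity)]
        rw [if_neg (by simp only [decide_eq_true_eq]; push_cast; omega)]
        have hacc : PySem.List.pyGetD (pvFlat lims vals) ((pvSP vals j : Int) + p) (0, 0)
            = ((vals.getD j []).getD p 0, lims.getD j 0) := by
          rw [show (pvSP vals j : Int) + p = ((pvSP vals j + p : Nat) : Int) by push_cast; ring]
          rw [PySem.List.pyGetD_natCast]
          exact pvFlat_getD lims vals hlen j p hjg hpm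
        rw [hacc]
        have hfs : (vals.getD j []).length - p = ((vals.getD j []).length - (p + 1)) + 1 := by
          omega
        rw [hfs]
        by_cases hcL : c < lims.getD j 0
        · simp only [if_pos hcL]
          simp only [altInner,
            if_pos (show (p : Int) < ((vals.getD j []).length : Int) by push_cast; omega),
            if_pos hcL]
          rw [PySem.List.pyGetD_natCast]
          set b' : Nat := PySem.List.bisectRight lims (c + 1) with hb'
          have hbeq : ((PySem.List.bisectRight ((pvFlat lims vals).map (fun x => x.2)) (c + 1) : Nat) : Int)
              = (pvSP vals b' : Int) := by
            rw [pvBisect_flat lims vals hlen hne hpw]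
          have hb'g : b' ≤ lims.length :=
            (PySem.List.bisectRight_spec lims (c + 1) (hpw.imp (fun h => le_of_lt h))).1
          rw [hbeq]
          have hpreb : PySem.List.pyGetD (altPre vals) ((b' : Int) - 1 + 1) 0
              = (pvSP vals b' : Int) := by
            rw [show ((b' : Int) - 1 + 1) = (b' : Int) by ring]
            rw [altPre_getD vals (by positivity) (by rw [← hlen]; push_cast; omega)]
            simp
          have hpret : PySem.List.pyGetD (altPre vals) (t + 1) 0
              = (pvSP vals (t + 1).toNat : Int) := by
            rw [altPre_getD vals (by omega) (by rw [← hlen]; push_cast; omega)]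
          have hprej : PySem.List.pyGetD (altPre vals) (j : Int) 0
              = (pvSP vals j : Int) := by
            rw [altPre_getD vals (by positivity) (by rw [← hlen]; push_cast; omega)]
            simp
          by_cases hbt : (pvSP vals b' : Int) - 1 ≥ (pvSP vals (t + 1).toNat : Int) - 1
          · -- invalidation fires
            have hbt' : ((b' : Int) - 1) ≥ t := by
              by_contra hlt
              have hb1 : b' < (t + 1).toNat := by omega
              have := pvSP_strict_mono vals hne hb1 (by omega)
              omega
            rw [if_pos hbt, if_pos hbt']
            have htn : pvSP vals (t + 1).toNat ≤ pvSP vals b' := by omega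
            have hrw1 : (pvSP vals (t + 1).toNat : Int) - 1 + 1
                = (pvSP vals (t + 1).toNat : Int) := by ring
            have hrw2 : (pvSP vals b' : Int) - 1 + 1
                = (pvSP vals (t + 1).toNat : Int)
                  + ((pvSP vals b' - pvSP vals (t + 1).toNat : Nat) : Int) := by
              push_cast [htn]; ring
            rw [hrw1, hrw2, pvInvFold _ _ _ _ _ (by positivity)]
            simp only
            have hrw3 : (pvSP vals (t + 1).toNat : Int)
                + ((pvSP vals b' - pvSP vals (t + 1).toNat : Nat) : Int)
                = (pvSP vals b' : Int) := by push_cast [htn]; ring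
            rw [hrw3]
            by_cases hbj : ((b' : Int) - 1) < (j : Int)
            · -- still inside run j afterwards
              rw [if_pos hbj]
              have hbj' : b' ≤ j := by omega
              have hSPbj : pvSP vals b' ≤ pvSP vals j := pvSP_mono vals hbj'
              rw [show c + 1 - max 0 (min (pvSP vals b' : Int)
                    ((pvSP vals j : Int) + (p : Int) + 1) - (pvSP vals (t + 1).toNat : Int))
                  = c + 1 - ((pvSP vals b' : Int) - (pvSP vals (t + 1).toNat : Int)) by omega]
              rw [pvMax_eq_max, max_eq_right (by omega)]
              rw [hpreb, hpret]
              have hIH := ih fuel fa' j (p + 1) ((b' : Int) - 1)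
                (ans + (vals.getD j []).getD p 0)
                (c + 1 - ((pvSP vals b' : Int) - (pvSP vals (t + 1).toNat : Int)))
                (by omega) (by omega) (by omega) (by omega) (by omega) (by omega) hfuel (by omega)
              rw [if_pos hjg] at hIH
              rw [show ((b' : Int) - 1 + 1).toNat = b' by omega] at hIH
              rw [show ((pvSP vals j : Int) + ((p + 1 : Nat) : Int))
                  = (pvSP vals j : Int) + (p : Int) + 1 by push_cast; ring] at hIH
              rw [show (((p + 1 : Nat)) : Int) = (p : Int) + 1 by push_cast; ring] at hIH
              rw [hIH]
            · -- jump past run j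
              rw [if_neg hbj]
              have hbj' : j + 1 ≤ b' := by omega
              have hSPbj : pvSP vals (j + 1) ≤ pvSP vals b' := pvSP_mono vals hbj'
              rw [show c + 1 - max 0 (min (pvSP vals b' : Int)
                    ((pvSP vals j : Int) + (p : Int) + 1) - (pvSP vals (t + 1).toNat : Int))
                  = c + 1 - ((pvSP vals j : Int) - (pvSP vals (t + 1).toNat : Int)
                      + ((p : Int) + 1)) by omega]
              rw [pvMax_eq_max, max_eq_left (by omega)]
              rw [hprej, hpret]
              -- B side: inner returned (ans', c'', b, b' ); outer continues at j' = b'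
              by_cases hb'G : b' < lims.length
              · -- unfold one outer step
                obtain ⟨fuel', rfl⟩ : ∃ f, fuel = f + 1 := by
                  have := hfuel hjg
                  cases fuel with
                  | zero => exfalso; push_cast at this; omega
                  | succ f => exact ⟨f, rfl⟩
                simp only [altOuter]
                rw [if_pos (show ((b' : Int) - 1 + 1) < (lims.length : Int) by push_cast; omega)]
                have hIH := ih fuel' fa' b' 0 ((b' : Int) - 1)
                  (ans + (vals.getD j []).getD p 0)
                  (c + 1 - ((pvSP vals j : Int) - (pvSP vals (t + 1).toNat : Int)
                    + ((p : Int) + 1)))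
                  (by
                    have hW : (vals.getD b' []).length ≤ pvSP vals lims.length := by
                      have h1 := pvSP_succ vals b' (by omega)
                      have h2 := pvSP_mono vals (k := b' + 1) (k' := lims.length) (by omega)
                      have h3 := pvSP_mono vals (k := 0) (k' := b') (by omega)
                      omega
                    have hmul : (lims.length - b') * (pvSP vals lims.length + 1) + pvSP vals lims.length
                        < (lims.length - j) * (pvSP vals lims.length + 1) := by
                      have hd : lims.length - b' + 1 ≤ lims.length - j := by omega
                      calc (lims.length - b') * (pvSP vals lims.length + 1) + pvSP vals lims.length
                          < (lims.length - b' + 1) * (pvSP vals lims.length + 1) := by ring_nf; omega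
                        _ ≤ (lims.length - j) * (pvSP vals lims.length + 1) :=
                            Nat.mul_le_mul_right _ hd
                    omega)
                  (by omega) (by intro _; omega) (by omega) (by omega) (by push_cast; omega)
                  (by intro _; push_cast; omega) (by omega)
                rw [if_pos hb'G] at hIH
                rw [show ((b' : Int) - 1 + 1).toNat = b' by omega] at hIH
                rw [show (pvSP vals b' : Int) + ((0 : Nat) : Int) = (pvSP vals b' : Int)
                  by push_cast; ring] at hIH
                have hL : PySem.List.pyGetD lims ((b' : Int) - 1 + 1) 0 = lims.getD b' 0 := by
                  rw [show ((b' : Int) - 1 + 1) = ((b' : Nat) : Int) by push_cast; ring,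
                    PySem.List.pyGetD_natCast]
                have hV : PySem.List.pyGetD vals ((b' : Int) - 1 + 1) [] = vals.getD b' [] := by
                  rw [show ((b' : Int) - 1 + 1) = ((b' : Nat) : Int) by push_cast; ring,
                    PySem.List.pyGetD_natCast]
                rw [hL, hV]
                rw [show ((b' : Int) - 1 + 1) = ((b' : Nat) : Int) by push_cast; ring]
                push_cast [Nat.sub_zero, add_zero] at hIH
                push_cast
                rw [hIH]
              · -- b' = lims.length : everything after is exhausted on both sides
                rw [altOuter_ge _ _ _ _ _ _ _ _ _
                    (by push_cast; omega)]
                have hb'' : b' = lims.length := by omega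
                have hIH := ih fuel fa' lims.length 0 ((b' : Int) - 1)
                  (ans + (vals.getD j []).getD p 0)
                  (c + 1 - ((pvSP vals j : Int) - (pvSP vals (t + 1).toNat : Int)
                    + ((p : Int) + 1)))
                  (by
                    have hnil : vals[lims.length]? = none := List.getElem?_eq_none (by omega)
                    simp [List.getD_eq_getElem?_getD, hnil])
                  (by omega) (by intro h; omega) (by intro _; rfl)
                  (by omega) (by push_cast; omega) (by intro h; omega) (by omega)
                rw [if_neg (by omega)] at hIH
                rw [show ((b' : Int) - 1 + 1).toNat = b' by omega, hb''] at hIH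
                rw [show (pvSP vals lims.length : Int) + ((0 : Nat) : Int)
                    = (pvSP vals lims.length : Int) by push_cast; ring] at hIH
                rw [← hb''] at hIH
                rw [hIH]
          · -- no invalidation (idx < temp)
            have hbt2 : ¬ ((b' : Int) - 1 ≥ t) := by
              intro hge
              have : (t + 1).toNat ≤ b' := by omega
              have := pvSP_mono vals this
              omega
            rw [if_neg hbt, if_neg hbt2]
            rw [pvMax_eq_max, max_eq_right (by omega)]
            have hIH := ih fuel fa' j (p + 1) t (ans + (vals.getD j []).getD p 0) (c + 1)
              (by omega) (by omega) (by omega) (by omega) (by omega) (by omega) hfuel (by omega)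
            rw [if_pos hjg] at hIH
            rw [show ((pvSP vals j : Int) + ((p + 1 : Nat) : Int))
                = (pvSP vals j : Int) + (p : Int) + 1 by push_cast; ring] at hIH
            rw [show (((p + 1 : Nat)) : Int) = (p : Int) + 1 by push_cast; ring] at hIH
            rw [hIH]
        · -- skip: c ≥ L
          simp only [if_neg hcL]
          simp only [altInner,
            if_pos (show (p : Int) < ((vals.getD j []).length : Int) by push_cast; omega),
            if_neg hcL]
          rw [pvMax_eq_max, max_eq_right (by omega)]
          have hIH := ih fuel fa' j (p + 1) t ans c
            (by omega) (by omega) (by omega) (by omega) (by omega) (by omega) hfuel (by omega)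
          rw [if_pos hjg] at hIH
          rw [show ((pvSP vals j : Int) + ((p + 1 : Nat) : Int))
              = (pvSP vals j : Int) + (p : Int) + 1 by push_cast; ring] at hIH
          rw [show (((p + 1 : Nat)) : Int) = (p : Int) + 1 by push_cast; ring] at hIH
          rw [hIH]
      · -- p = len_j : silent transition to run j+1
        have hpe : p = (vals.getD j []).length := by omega
        rw [show ((vals.getD j []).length - p) = 0 by omega]
        simp only [altInner]
        by_cases hj1 : j + 1 < lims.length
        · obtain ⟨fuel', rfl⟩ : ∃ f, fuel = f + 1 := by
            have := hfuel hjg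
            cases fuel with
            | zero => exfalso; push_cast at this; omega
            | succ f => exact ⟨f, rfl⟩
          simp only [altOuter]
          rw [if_pos (show ((j : Int) + 1) < (lims.length : Int) by push_cast; omega)]
          have hIH := ih fuel' fa (j + 1) 0 t ans c
            (by
              have hW : (vals.getD (j + 1) []).length ≤ pvSP vals lims.length := by
                have h1 := pvSP_succ vals (j + 1) (by omega)
                have h2 := pvSP_mono vals (k := j + 1 + 1) (k' := lims.length) (by omega)
                have h3 := pvSP_mono vals (k := 0) (k' := j + 1) (by omega)
                omega
              have hmul : (lims.length - (j + 1)) * (pvSP vals lims.length + 1) + pvSP vals lims.length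
                  < (lims.length - j) * (pvSP vals lims.length + 1) := by
                have hd : lims.length - (j + 1) + 1 ≤ lims.length - j := by omega
                calc (lims.length - (j + 1)) * (pvSP vals lims.length + 1) + pvSP vals lims.length
                    < (lims.length - (j + 1) + 1) * (pvSP vals lims.length + 1) := by ring_nf; omega
                  _ ≤ (lims.length - j) * (pvSP vals lims.length + 1) :=
                      Nat.mul_le_mul_right _ hd
              omega)
            (by omega) (by intro _; omega) (by intro h; omega) (by omega) (by push_cast; omega)
            (by intro _; push_cast; omega) (by omega)
          rw [if_pos hj1] at hIH
          rw [show ((pvSP vals j : Int) + (p : Int)) = ((pvSP vals (j + 1) : Nat) : Int) by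
            push_cast [hSPsucc]; omega]
          rw [show ((pvSP vals (j + 1) : Nat) : Int) + ((0 : Nat) : Int)
              = ((pvSP vals (j + 1) : Nat) : Int) by push_cast; ring] at hIH
          have hL : PySem.List.pyGetD lims ((j : Int) + 1) 0 = lims.getD (j + 1) 0 := by
            rw [show ((j : Int) + 1) = ((j + 1 : Nat) : Int) by push_cast; ring,
              PySem.List.pyGetD_natCast]
          have hV : PySem.List.pyGetD vals ((j : Int) + 1) [] = vals.getD (j + 1) [] := by
            rw [show ((j : Int) + 1) = ((j + 1 : Nat) : Int) by push_cast; ring,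
              PySem.List.pyGetD_natCast]
          rw [hL, hV]
          push_cast [Nat.sub_zero, add_zero] at hIH
          push_cast
          rw [hIH]
        · -- j + 1 = lims.length : loop over on both sides
          rw [altOuter_ge _ _ _ _ _ _ _ _ _ (by push_cast; omega)]
          have hIH := ih fuel fa lims.length 0 t ans c
            (by
              have hnil : vals[lims.length]? = none := List.getElem?_eq_none (by omega)
              simp [List.getD_eq_getElem?_getD, hnil])
            (by omega) (by intro h; omega) (by intro _; rfl)
            (by omega) (by push_cast; omega) (by intro h; omega) (by omega)
          rw [if_neg (by omega)] at hIH
          rw [show ((pvSP vals j : Int) + (p : Int)) = ((pvSP vals lims.length : Nat) : Int) by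
            rw [show lims.length = j + 1 by omega]
            push_cast [hSPsucc]; omega]
          rw [show ((pvSP vals lims.length : Nat) : Int) + ((0 : Nat) : Int)
              = ((pvSP vals lims.length : Nat) : Int) by push_cast; ring] at hIH
          rw [hIH]
    · -- j = lims.length : A's loop is over
      rw [if_neg hjg]
      have hp' : p = 0 := hp0 (by omega)
      subst hp'
      exact maxTotalLoop_stop _ _ _ _ _ _ _ _ _ (by
        rw [hn]
        rw [show j = lims.length by omega]
        push_cast; omega)

theorem pvPT_zero (n : Nat) : pvPT n 0 = List.replicate n false := by
  apply List.ext_getElem (by simp [pvPT])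
  intro k h1 h2
  simp [pvPT]

theorem pvMain (value limit : List Int) (hpre : value.length ≤ limit.length) :
    maxTotal value limit = maxTotal_alt value limit := by
  dsimp only [maxTotal, maxTotal_alt]
  set vl := PySem.List.sorted2 (value.zip limit) (fun x => x.2) (fun x => -x.1) with hvl
  have hsorted : vl.Pairwise (fun a b => a.2 ≤ b.2) :=
    pvSorted2_key1 (value.zip limit) (fun x => x.2) (fun x => -x.1)
  have hok : pvRunsOK vl (vl.foldl altRunsStep ([], [])).1 (vl.foldl altRunsStep ([], [])).2 := by
    have := pvRuns_invariant vl [] [] [] (by simpa using hsorted)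
      ⟨rfl, by simp, List.Pairwise.nil, by simp [pvFlat]⟩
    simpa using this
  set lims := (vl.foldl altRunsStep ([], [])).1 with hlims
  set vals := (vl.foldl altRunsStep ([], [])).2 with hvals
  obtain ⟨hlen, hne, hpw, hflat⟩ := hok
  have hnv : value.length = vl.length := by
    rw [hvl, (PySem.List.sorted2_perm _ _ _ _).length_eq, List.length_zip]
    omega
  have hg : vl.length = pvSP vals lims.length := by
    rw [← hflat]; exact pvFlat_length lims vals hlen
  rw [show ((value.length : Int)) = ((vl.length : Nat) : Int) by rw [hnv]]
  rw [show (((vl.length : Nat) : Int)).toNat = vl.length by simp]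
  match hgz : lims.length with
  | 0 =>
    -- no runs: vl is empty, both sides return 0
    have hvl0 : vl.length = 0 := by rw [hg, hgz, pvSP_zero]
    have hgrd1 : ¬ ((0 : Int) < ((vl.length : Nat) : Int)) := by simp [hvl0]
    rw [maxTotalLoop_stop _ _ _ _ _ _ _ _ _ hgrd1]
    rfl
  | g + 1 =>
    -- unfold the first outer iteration of B
    have hgz' : (lims.length : Int) = ((g + 1 : Nat) : Int) := by rw [hgz]
    simp only [altOuter]
    rw [if_pos (show (0 : Int) < ((g + 1 : Nat) : Int) by push_cast; omega)]
    have hL0 : PySem.List.pyGetD lims (0 : Int) 0 = lims.getD 0 0 := by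
      rw [PySem.List.pyGetD_of_nonneg _ _ (by omega)]
      simp
    have hV0 : PySem.List.pyGetD vals (0 : Int) [] = vals.getD 0 [] := by
      rw [PySem.List.pyGetD_of_nonneg _ _ (by omega)]
      simp
    rw [hL0, hV0]
    have hbis := pvBisim lims vals hlen hne hpw
      ((lims.length - 0) * (pvSP vals lims.length + 1) + ((vals.getD 0 []).length - 0))
      g vl.length 0 0 (-1) 0 0 (le_refl _) (Nat.zero_le _) (fun _ => Nat.zero_le _) (fun _ => rfl)
      (by omega) (by simp) (fun _ => by rw [hgz]; push_cast; omega)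
      (by rw [← hg]; omega)
    rw [if_pos (by omega)] at hbis
    rw [hflat] at hbis
    rw [show ((-1 : Int) + 1).toNat = 0 by simp] at hbis
    rw [pvSP_zero] at hbis
    rw [show ((0 : Nat) : Int) = (0 : Int) by simp] at hbis
    rw [show ((0 : Int) + (0 : Int)) = (0 : Int) by ring] at hbis
    rw [show ((0 : Int) - 1) = (-1 : Int) by ring] at hbis
    rw [pvPT_zero] at hbis
    rw [show ((vals.getD 0 []).length - 0) = (vals.getD 0 []).length by omega] at hbis
    rw [hbis, hgz']

-- ===== VERDICT (by name: the statement is the Claim_ definition above) =====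
theorem maxTotal_spec : Claim_equal_maxTotal := by
  intro value limit _ hpre
  exact pvMain value limit hpre
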